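-- pv_equiv track=rewrite | github.com/yal054/Mouse-Pangenomics-Workflow | Assemblies/find_gaps.py | count_gap_bases_and_blocks
-- ===== SOURCE A (Python) =====
-- def count_gap_bases_and_blocks(sequence):
--     in_gap = False
--
--     total_gap_bases = 0
--
--     gap_blocks = 0
--
--     for base in sequence:
--
--         if base == 'N':
--
--             if not in_gap:
--                 in_gap = True
--
--                 gap_blocks += 1
--
--             total_gap_bases += 1
--
--         else:
--
--             in_gap = False
--
--     return total_gap_bases, gap_blocks
-- ===== SOURCE B (Python) =====
-- import re
--
-- def count_gap_bases_and_blocks(sequence):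
--     matches = re.findall(r'N+', sequence)
--     return sum(len(m) for m in matches), len(matches)
-- ===== Notes on version B (the rewrite author's own statement) =====
-- stated objective: idiomatic
-- what changed: Replaces the char-by-char state machine with an in_gap flag by a regex that extracts all maximal N-runs up front, then sums their lengths and counts them; the C-level regex scan beats the Python-level per-character loop by a constant factor.
import Mathlib
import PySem

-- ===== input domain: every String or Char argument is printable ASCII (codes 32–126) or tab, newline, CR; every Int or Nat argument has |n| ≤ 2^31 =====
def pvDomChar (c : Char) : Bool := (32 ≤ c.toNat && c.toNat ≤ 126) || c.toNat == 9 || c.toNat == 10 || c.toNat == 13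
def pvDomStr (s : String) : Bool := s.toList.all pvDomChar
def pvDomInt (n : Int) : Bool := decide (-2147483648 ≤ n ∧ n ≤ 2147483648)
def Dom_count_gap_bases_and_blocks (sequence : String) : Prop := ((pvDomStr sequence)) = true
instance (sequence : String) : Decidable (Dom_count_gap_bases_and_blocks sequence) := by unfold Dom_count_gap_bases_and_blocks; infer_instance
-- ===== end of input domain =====

-- B replaces A's char-by-char in_gap state machine by extracting all maximal N-runs
-- up front (regex findall in Python), then summing their lengths and counting them
-- (objective: idiomatic; same asymptotic cost).

-- ===== PORT A =====
-- A's for-loop over the characters with state (in_gap, total_gap_bases, gap_blocks),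
-- transliterated as structural recursion over the same state.
def pvALoop (l : List Char) (in_gap : Bool) (total_gap_bases gap_blocks : Int) : Int × Int :=
  match l with
  | [] => (total_gap_bases, gap_blocks)
  | base :: rest =>
    if base = 'N' then
      if !in_gap then pvALoop rest true (total_gap_bases + 1) (gap_blocks + 1)
      else pvALoop rest true (total_gap_bases + 1) gap_blocks
    else pvALoop rest false total_gap_bases gap_blocks

def count_gap_bases_and_blocks (sequence : String) : Int × Int :=
  pvALoop sequence.toList false 0 0

-- ===== PORT B =====
-- re.findall(r'N+', sequence): the list of maximal runs of 'N', left to right.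
def pvNRuns (l : List Char) : List (List Char) :=
  match l with
  | [] => []
  | [c] => if c = 'N' then [['N']] else []
  | c :: d :: rest =>
    if c = 'N' then
      if d = 'N' then
        match pvNRuns (d :: rest) with
        | run :: rs => ('N' :: run) :: rs
        | [] => [['N']]  -- unreachable: d = 'N' so the first run is nonempty
      else ['N'] :: pvNRuns (d :: rest)
    else pvNRuns (d :: rest)

def count_gap_bases_and_blocks_alt (sequence : String) : Int × Int :=
  let ms := pvNRuns sequence.toList
  ((ms.map (fun m => (m.length : Int))).sum, (ms.length : Int))

-- ===== PRECONDITION & SPEC =====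
def Spec_count_gap_bases_and_blocks (sequence : String) (out : Int × Int) : Prop := out = count_gap_bases_and_blocks_alt sequence
instance (sequence : String) (out : Int × Int) : Decidable (Spec_count_gap_bases_and_blocks sequence out) := by unfold Spec_count_gap_bases_and_blocks; infer_instance

-- ===== CLAIM (what is proved, stated in full; the proofs are below) =====
def Claim_equal_count_gap_bases_and_blocks : Prop := ∀ (sequence : String), Dom_count_gap_bases_and_blocks sequence → Spec_count_gap_bases_and_blocks sequence (count_gap_bases_and_blocks sequence)

-- ===== LEMMAS AND PROOFS =====

-- block counter with A's in_gap convention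
def pvBlocks (in_gap : Bool) (l : List Char) : Nat :=
  match l with
  | [] => 0
  | c :: rest =>
    if c = 'N' then (if in_gap then pvBlocks true rest else 1 + pvBlocks true rest)
    else pvBlocks false rest

theorem pvALoop_eq (l : List Char) : ∀ (ig : Bool) (t b : Int),
    pvALoop l ig t b = (t + (l.count 'N' : Int), b + (pvBlocks ig l : Int)) := by
  induction l with
  | nil => intro ig t b; simp [pvALoop, pvBlocks]
  | cons c rest ih =>
    intro ig t b
    by_cases hc : c = 'N'
    · cases ig <;> simp [pvALoop, pvBlocks, hc, ih] <;> omega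
    · simp [pvALoop, pvBlocks, hc, ih]

theorem pvBlocks_false_true (l : List Char) :
    pvBlocks false l = pvBlocks true l + (if l.head? = some 'N' then 1 else 0) := by
  cases l with
  | nil => simp [pvBlocks]
  | cons c rest => by_cases hc : c = 'N' <;> simp [pvBlocks, hc] <;> omega

theorem pvNRuns_length (l : List Char) : (pvNRuns l).length = pvBlocks false l := by
  induction l with
  | nil => simp [pvNRuns, pvBlocks]
  | cons c rest ih =>
    cases rest with
    | nil =>
      by_cases hc : c = 'N' <;> simp [pvNRuns, pvBlocks, hc]
    | cons d rest' =>
      by_cases hc : c = 'N'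
      · subst hc
        by_cases hd : d = 'N'
        · subst hd
          cases hr : pvNRuns ('N' :: rest') with
          | nil =>
            exfalso
            have h := ih
            rw [hr, pvBlocks_false_true] at h
            simp at h
          | cons run rs =>
            have h := ih
            rw [hr] at h
            rw [pvBlocks_false_true] at h
            simp at h
            simp [pvNRuns, hr, pvBlocks]
            have h2 : pvBlocks true ('N' :: rest') = pvBlocks true rest' := by
              simp [pvBlocks]
            omega
        · have h3 : pvBlocks true (d :: rest') = pvBlocks false rest' := by
            rw [pvBlocks.eq_def]; simp [hd]
          have h4 : pvBlocks false (d :: rest') = pvBlocks false rest' := by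
            rw [pvBlocks.eq_def]; simp [hd]
          simp [pvNRuns, hd, pvBlocks, ih, h3, h4]
          try omega
      · simp [pvNRuns, pvBlocks, hc, ih]

theorem pvNRuns_sum (l : List Char) :
    ((pvNRuns l).map List.length).sum = l.count 'N' := by
  induction l with
  | nil => simp [pvNRuns]
  | cons c rest ih =>
    cases rest with
    | nil =>
      by_cases hc : c = 'N' <;> simp [pvNRuns, hc, List.count_cons]
    | cons d rest' =>
      by_cases hc : c = 'N'
      · subst hc
        by_cases hd : d = 'N'
        · subst hd
          cases hr : pvNRuns ('N' :: rest') with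
          | nil =>
            exfalso
            have hlen := pvNRuns_length ('N' :: rest')
            rw [hr, pvBlocks_false_true] at hlen
            simp at hlen
          | cons run rs =>
            have h := ih
            rw [hr] at h
            simp [List.count_cons] at h
            simp [pvNRuns, hr, List.count_cons]
            omega
        · simp [pvNRuns, hd, ih]
          omega
      · simp [pvNRuns, hc, ih]

theorem pvCastSum (rs : List (List Char)) :
    ((rs.map (fun m => (m.length : Int))).sum) = (((rs.map List.length).sum : Nat) : Int) := by
  induction rs with
  | nil => rfl
  | cons a t ih => simp only [List.map_cons, List.sum_cons, ih]; push_cast; ring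

-- ===== VERDICT (by name: the statement is the Claim_ definition above) =====
theorem count_gap_bases_and_blocks_spec : Claim_equal_count_gap_bases_and_blocks := by
  intro sequence _
  unfold Spec_count_gap_bases_and_blocks count_gap_bases_and_blocks count_gap_bases_and_blocks_alt
  rw [pvALoop_eq]
  have h1 := pvNRuns_sum sequence.toList
  have h2 := pvNRuns_length sequence.toList
  simp only []
  refine Prod.ext ?_ ?_
  · simp only [zero_add, ← h1, pvCastSum]
  · simp [← h2]
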